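-- pv_equiv track=rewrite | github.com/energyGiver/nasol | nasol/analysis.py | _snippet
-- ===== SOURCE A (Python) =====
-- def _snippet(transcript: str, tokens: list[str], max_len: int = 100) -> str:
--     if not transcript:
--         return ""
--     lowered = transcript.lower()
--     position = -1
--     chosen = ""
--     for token in tokens:
--         index = lowered.find(token)
--         if index >= 0 and (position == -1 or index < position):
--             position = index
--             chosen = token
--
--     if position < 0:
--         return transcript[:max_len].strip()
--
--     start = max(position - 20, 0)
--     end = min(position + max_len, len(transcript))
--     snippet = transcript[start:end].replace("\n", " ").strip()
--     if start > 0: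
--         snippet = f"...{snippet}"
--     if end < len(transcript):
--         snippet = f"{snippet}..."
--     return snippet
-- ===== SOURCE B (Python) =====
-- def _snippet(transcript: str, tokens: list[str], max_len: int = 100) -> str:
--     if not transcript:
--         return ""
--     lowered = transcript.lower()
--     # single left-to-right scan: the first index at which ANY token starts,
--     # instead of one find() pass per token followed by a running minimum
--     position = -1
--     i = 0
--     n = len(lowered)
--     while i <= n:
--         if any(lowered.startswith(t, i) for t in tokens):
--             position = i
--             break
--         i += 1
--
--     if position < 0:
--         return transcript[:max_len].strip()
--
--     start = max(position - 20, 0)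
--     end = min(position + max_len, len(transcript))
--     core = transcript[start:end].replace("\n", " ").strip()
--     return ("..." if start > 0 else "") + core + ("..." if end < len(transcript) else "")
-- ===== Notes on version B (the rewrite author's own statement) =====
-- stated objective: alternative
-- what changed: Replaces the token-major loop (one find() scan per token plus a running minimum with tie-bookkeeping) by a single position-major left-to-right scan that stops at the first index where any token starts, and builds the ellipsis affixes in one expression instead of two sequential reassignments.
import Mathlib
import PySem

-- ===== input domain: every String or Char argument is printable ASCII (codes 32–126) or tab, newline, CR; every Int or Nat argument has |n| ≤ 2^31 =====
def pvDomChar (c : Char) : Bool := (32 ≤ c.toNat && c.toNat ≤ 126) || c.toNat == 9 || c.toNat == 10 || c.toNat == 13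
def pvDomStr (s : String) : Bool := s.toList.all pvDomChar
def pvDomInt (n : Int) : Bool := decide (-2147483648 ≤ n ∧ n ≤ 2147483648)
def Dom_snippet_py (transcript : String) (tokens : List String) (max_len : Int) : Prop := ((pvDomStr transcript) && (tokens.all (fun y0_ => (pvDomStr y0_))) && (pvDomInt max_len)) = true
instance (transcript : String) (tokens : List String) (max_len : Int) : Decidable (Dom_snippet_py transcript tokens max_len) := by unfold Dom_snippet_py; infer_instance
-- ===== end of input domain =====

-- B replaces A's token-major loop (one find() per token plus a running minimum) by a single
-- position-major scan stopping at the first index where any token starts; same results, same cost class.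

-- ===== PORT A =====
def snippet_py (transcript : String) (tokens : List String) (max_len : Int) : String :=
  if transcript = "" then "" else
  let lowered := PySem.Str.lower transcript
  -- position, chosen updated together in the loop (chosen is never read afterwards, as in A)
  let pc : Int × String := tokens.foldl (fun pc token =>
      let index := PySem.Str.find lowered token
      if 0 ≤ index ∧ (pc.1 = -1 ∨ index < pc.1) then (index, token) else pc)
    ((-1 : Int), "")
  let position := pc.1
  if position < 0 then
    PySem.Str.strip (PySem.Str.slice transcript none (some max_len))
  else
    let start := max (position - 20) 0
    let stop := min (position + max_len) ((PySem.Str.len transcript : Int))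
    let snippet := PySem.Str.strip (PySem.Str.replace (PySem.Str.slice transcript (some start) (some stop)) "\n" " ")
    let snippet := if 0 < start then "..." ++ snippet else snippet
    let snippet := if stop < (PySem.Str.len transcript : Int) then snippet ++ "..." else snippet
    snippet

-- ===== PORT B =====
-- B-side helper: the 'while i <= n' scan of Source B; Python's 'lowered.startswith(t, i)' with the
-- loop's nonnegative i is ported by hand as startswith on the drop-i suffix (exact for 0 ≤ i ).
def pvScan (lo : List Char) (tokens : List String) (i : Nat) : Int :=
  if h : i ≤ lo.length then
    if tokens.any (fun t => PySem.Chars.startswith (lo.drop i) t.toList) then (i : Int)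
    else pvScan lo tokens (i + 1)
  else -1
termination_by lo.length + 1 - i
decreasing_by omega

def snippet_py_alt (transcript : String) (tokens : List String) (max_len : Int) : String :=
  if transcript = "" then "" else
  let lowered := PySem.Str.lower transcript
  let position := pvScan lowered.toList tokens 0
  if position < 0 then
    PySem.Str.strip (PySem.Str.slice transcript none (some max_len))
  else
    let start := max (position - 20) 0
    let stop := min (position + max_len) ((PySem.Str.len transcript : Int))
    let core := PySem.Str.strip (PySem.Str.replace (PySem.Str.slice transcript (some start) (some stop)) "\n" " ")
    (if 0 < start then "..." else "") ++ core ++ (if stop < (PySem.Str.len transcript : Int) then "..." else "")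

-- ===== PRECONDITION & SPEC =====
def Spec_snippet_py (transcript : String) (tokens : List String) (max_len : Int) (out : String) : Prop := out = snippet_py_alt transcript tokens max_len
instance (transcript : String) (tokens : List String) (max_len : Int) (out : String) : Decidable (Spec_snippet_py transcript tokens max_len out) := by unfold Spec_snippet_py; infer_instance

-- ===== CLAIM (what is proved, stated in full; the proofs are below) =====
def Claim_equal_snippet_py : Prop := ∀ (transcript : String) (tokens : List String) (max_len : Int), Dom_snippet_py transcript tokens max_len → Spec_snippet_py transcript tokens max_len (snippet_py transcript tokens max_len)

-- ===== LEMMAS AND PROOFS =====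

-- A's running minimum over the finds, projected to the position component
def pvAMin (lowered : String) (ts : List String) (p : Int) : Int :=
  ts.foldl (fun p token =>
    if 0 ≤ PySem.Str.find lowered token ∧ (p = -1 ∨ PySem.Str.find lowered token < p)
    then PySem.Str.find lowered token else p) p

lemma pvFoldl_fst (lowered : String) (ts : List String) : ∀ (pc : Int × String),
    (ts.foldl (fun pc token =>
        if 0 ≤ PySem.Str.find lowered token ∧ (pc.1 = -1 ∨ PySem.Str.find lowered token < pc.1)
        then (PySem.Str.find lowered token, token) else pc) pc).1
    = pvAMin lowered ts pc.1 := by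
  induction ts with
  | nil => intro pc; simp [pvAMin]
  | cons t ts ih =>
    intro pc
    rw [List.foldl_cons, ih]
    have h1 : ((if 0 ≤ PySem.Str.find lowered t ∧ (pc.1 = -1 ∨ PySem.Str.find lowered t < pc.1)
          then (PySem.Str.find lowered t, t) else pc) : Int × String).1
        = if 0 ≤ PySem.Str.find lowered t ∧ (pc.1 = -1 ∨ PySem.Str.find lowered t < pc.1)
          then PySem.Str.find lowered t else pc.1 := by split_ifs <;> rfl
    rw [h1]
    simp only [pvAMin, List.foldl_cons]

lemma pvAMin_spec (lowered : String) : ∀ (ts : List String) (p : Int), p = -1 ∨ 0 ≤ p →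
    (pvAMin lowered ts p = -1 ∧ p = -1 ∧ ∀ t ∈ ts, PySem.Str.find lowered t = -1) ∨
    (0 ≤ pvAMin lowered ts p ∧
     (pvAMin lowered ts p = p ∨ ∃ t ∈ ts, PySem.Str.find lowered t = pvAMin lowered ts p) ∧
     (p = -1 ∨ pvAMin lowered ts p ≤ p) ∧
     ∀ t ∈ ts, PySem.Str.find lowered t = -1 ∨ pvAMin lowered ts p ≤ PySem.Str.find lowered t) := by
  intro ts
  induction ts with
  | nil =>
    intro p hp
    rcases hp with hp | hp
    · left; simp [pvAMin, hp]
    · right; simp [pvAMin, hp]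
  | cons t ts ih =>
    intro p hp
    have hstep : pvAMin lowered (t :: ts) p
        = pvAMin lowered ts (if 0 ≤ PySem.Str.find lowered t ∧ (p = -1 ∨ PySem.Str.find lowered t < p)
            then PySem.Str.find lowered t else p) := by
      simp [pvAMin]
    by_cases hc : 0 ≤ PySem.Str.find lowered t ∧ (p = -1 ∨ PySem.Str.find lowered t < p)
    · rw [hstep, if_pos hc]
      rcases ih (PySem.Str.find lowered t) (Or.inr hc.1) with ⟨h1, h2, _⟩ | ⟨h1, h2, h3, h4⟩
      · omega
      · right
        refine ⟨h1, ?_, ?_, ?_⟩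
        · rcases h2 with h2 | ⟨u, hu, hu2⟩
          · exact Or.inr ⟨t, by simp, h2.symm⟩
          · exact Or.inr ⟨u, by simp [hu], hu2⟩
        · rcases hp with hp | hp
          · exact Or.inl hp
          · rcases hc.2 with h | h
            · omega
            · rcases h3 with h3 | h3 <;> omega
        · intro u hu
          rcases List.mem_cons.mp hu with rfl | hu
          · rcases h3 with h3 | h3 <;> [omega; exact Or.inr (by omega)]
          · exact h4 u hu
    · rw [hstep, if_neg hc]
      rcases ih p hp with ⟨h1, h2, h3⟩ | ⟨h1, h2, h3, h4⟩
      · left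
        refine ⟨h1, h2, ?_⟩
        intro u hu
        rcases List.mem_cons.mp hu with rfl | hu
        · have hn : (-1 : Int) ≤ PySem.Str.find lowered u := by
            rw [PySem.Str.find_eq]; exact PySem.Chars.neg_one_le_find _ _
          subst h2; omega
        · exact h3 u hu
      · right
        refine ⟨h1, ?_, h3, ?_⟩
        · rcases h2 with h2 | ⟨u, hu, hu2⟩
          · exact Or.inl h2
          · exact Or.inr ⟨u, by simp [hu], hu2⟩
        · intro u hu
          rcases List.mem_cons.mp hu with rfl | hu
          · have hn : (-1 : Int) ≤ PySem.Str.find lowered u := by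
              rw [PySem.Str.find_eq]; exact PySem.Chars.neg_one_le_find _ _
            rcases hp with hp | hp
            · subst hp
              rcases h2 with h2 | ⟨v, hv, hv2⟩ <;> omega
            · rcases h3 with h3 | h3 <;> omega
          · exact h4 u hu

lemma pvScan_eq_neg_one (lo : List Char) (tokens : List String) :
    ∀ i, (∀ j, i ≤ j → j ≤ lo.length →
        tokens.any (fun t => PySem.Chars.startswith (lo.drop j) t.toList) = false) →
      pvScan lo tokens i = -1 := by
  have key : ∀ n i, lo.length + 1 - i ≤ n →
      (∀ j, i ≤ j → j ≤ lo.length →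
        tokens.any (fun t => PySem.Chars.startswith (lo.drop j) t.toList) = false) →
      pvScan lo tokens i = -1 := by
    intro n
    induction n with
    | zero =>
      intro i hn _
      rw [pvScan, dif_neg (by omega)]
    | succ n ih =>
      intro i hn h
      rw [pvScan]
      by_cases hle : i ≤ lo.length
      · rw [dif_pos hle, h i le_rfl hle]
        simp only [Bool.false_eq_true, if_false]
        exact ih (i + 1) (by omega) (fun j hj hj2 => h j (by omega) hj2)
      · rw [dif_neg hle]
  exact fun i h => key (lo.length + 1 - i) i le_rfl h

lemma pvScan_eq_some (lo : List Char) (tokens : List String) (k : Nat)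
    (hk : k ≤ lo.length)
    (hpred : tokens.any (fun t => PySem.Chars.startswith (lo.drop k) t.toList) = true) :
    ∀ i, i ≤ k →
      (∀ j, i ≤ j → j < k →
        tokens.any (fun t => PySem.Chars.startswith (lo.drop j) t.toList) = false) →
      pvScan lo tokens i = (k : Int) := by
  have key : ∀ n i, k - i ≤ n → i ≤ k →
      (∀ j, i ≤ j → j < k →
        tokens.any (fun t => PySem.Chars.startswith (lo.drop j) t.toList) = false) →
      pvScan lo tokens i = (k : Int) := by
    intro n
    induction n with
    | zero =>
      intro i hn hik _
      have : i = k := by omega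
      subst this
      rw [pvScan, dif_pos hk, hpred]
      simp
    | succ n ih =>
      intro i hn hik h
      by_cases hik' : i = k
      · subst hik'
        rw [pvScan, dif_pos hk, hpred]
        simp
      · rw [pvScan, dif_pos (by omega), h i le_rfl (by omega)]
        simp only [Bool.false_eq_true, if_false]
        exact ih (i + 1) (by omega) (by omega) (fun j hj hj2 => h j (by omega) hj2)
  exact fun i hik h => key (k - i) i le_rfl hik h

lemma pvPred_false_of_find (lowered : String) (tokens : List String) (j : Nat)
    (h : ∀ t ∈ tokens, PySem.Str.find lowered t = -1 ∨
          ¬ ((PySem.Chars.find lowered.toList t.toList).toNat ≤ j)) :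
    tokens.any (fun t => PySem.Chars.startswith (lowered.toList.drop j) t.toList) = false := by
  by_contra hne
  have hany : tokens.any (fun t => PySem.Chars.startswith (lowered.toList.drop j) t.toList) = true := by
    revert hne
    cases tokens.any (fun t => PySem.Chars.startswith (lowered.toList.drop j) t.toList) <;> simp
  obtain ⟨t, ht, hsw⟩ := List.any_eq_true.mp hany
  have hpre : t.toList <+: lowered.toList.drop j := (PySem.Chars.startswith_iff _ _).mp hsw
  have hin : PySem.Chars.isIn t.toList lowered.toList = true :=
    (PySem.Chars.exists_prefix_drop_iff_isIn _ _).mp ⟨j, hpre⟩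
  have hne1 : PySem.Chars.find lowered.toList t.toList ≠ -1 :=
    (PySem.Chars.find_ne_neg_one_iff _ _).mpr ((PySem.Chars.isIn_iff_infix _ _).mp hin)
  have hge : (0 : Int) ≤ PySem.Chars.find lowered.toList t.toList := by
    have := PySem.Chars.neg_one_le_find lowered.toList t.toList
    omega
  have hmin := (PySem.Chars.find_spec (s := lowered.toList) (sub := t.toList) hge).2
  have hle : (PySem.Chars.find lowered.toList t.toList).toNat ≤ j := by
    by_contra hgt
    exact hmin j (by omega) hpre
  rcases h t ht with h' | h'
  · rw [PySem.Str.find_eq] at h'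
    exact hne1 h'
  · exact h' hle

lemma posA_eq_posB (lowered : String) (tokens : List String) :
    pvAMin lowered tokens (-1) = pvScan lowered.toList tokens 0 := by
  rcases pvAMin_spec lowered tokens (-1) (Or.inl rfl) with ⟨h1, _, h3⟩ | ⟨h1, h2, _, h4⟩
  · rw [h1]
    refine (pvScan_eq_neg_one lowered.toList tokens 0 ?_).symm
    intro j _ _
    exact pvPred_false_of_find lowered tokens j (fun t ht => Or.inl (h3 t ht))
  · obtain ⟨t0, ht0, ht0eq⟩ : ∃ t ∈ tokens,
        PySem.Str.find lowered t = pvAMin lowered tokens (-1) := by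
      rcases h2 with h2 | h2
      · omega
      · exact h2
    have hfr : PySem.Chars.find lowered.toList t0.toList = pvAMin lowered tokens (-1) := by
      rw [← PySem.Str.find_eq]; exact ht0eq
    have hlen : pvAMin lowered tokens (-1) ≤ (lowered.toList.length : Int) := by
      rw [← hfr]; exact PySem.Chars.find_le_length lowered.toList t0.toList
    have hpre := (PySem.Chars.find_spec (s := lowered.toList) (sub := t0.toList) (by omega)).1
    have hpred : tokens.any (fun t =>
        PySem.Chars.startswith (lowered.toList.drop (pvAMin lowered tokens (-1)).toNat) t.toList) = true := by
      refine List.any_eq_true.mpr ⟨t0, ht0, ?_⟩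
      refine (PySem.Chars.startswith_iff _ _).mpr ?_
      rw [hfr] at hpre
      exact hpre
    have := pvScan_eq_some lowered.toList tokens (pvAMin lowered tokens (-1)).toNat
      (by omega) hpred 0 (by omega) ?_
    · rw [this]; omega
    · intro j _ hj2
      refine pvPred_false_of_find lowered tokens j (fun t ht => ?_)
      rcases h4 t ht with h' | h'
      · exact Or.inl h'
      · refine Or.inr ?_
        rw [PySem.Str.find_eq] at h'
        omega

-- ===== VERDICT (by name: the statement is the Claim_ definition above) =====
theorem snippet_py_spec : Claim_equal_snippet_py := by
  intro transcript tokens max_len _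
  unfold Spec_snippet_py
  by_cases he : transcript = ""
  · simp [snippet_py, snippet_py_alt, he]
  · simp only [snippet_py, snippet_py_alt, if_neg he]
    have hpos : (tokens.foldl (fun pc token =>
        if 0 ≤ PySem.Str.find (PySem.Str.lower transcript) token ∧
            (pc.1 = -1 ∨ PySem.Str.find (PySem.Str.lower transcript) token < pc.1)
        then (PySem.Str.find (PySem.Str.lower transcript) token, token) else pc)
        ((-1 : Int), "")).1 = pvScan (PySem.Str.lower transcript).toList tokens 0 :=
      (pvFoldl_fst (PySem.Str.lower transcript) tokens ((-1 : Int), "")).trans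
        (posA_eq_posB (PySem.Str.lower transcript) tokens)
    rw [hpos]
    split_ifs with h1 h2 h3 <;>
      simp [String.empty_append, String.append_empty]
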